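-- pv_equiv track=rewrite | github.com/mit1280/primelibpy | Prime.py | getWieferichPrime
-- ===== SOURCE A (Python) =====
-- def getWieferichPrime(startLimit,endLimit):
--     p,r=startLimit,endLimit
--     l1=[]
--     from fractions import Fraction
--     if p==1:
--         p=2
--     for a in range(p,r+1):
--         k=0
--         for i in range(2,int(a/2)+1):
--             if(a%i==0):
--                 k=k+1
--                 break
--         if(k<=0):
--             x=a*a
--             y=2**(a-1)-1
--             z=Fraction(y,x)
--             z=(z)-int(z)
--             if(z==0.0):
--                 l1.append(a)
--     return(l1)
-- ===== SOURCE B (Python) =====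
-- def _is_prime(n):
--     if n < 2:
--         return False
--     i = 2
--     while i * i <= n:
--         if n % i == 0:
--             return False
--         i += 1
--     return True
--
-- def getWieferichPrime(startLimit, endLimit):
--     p = 2 if startLimit == 1 else startLimit
--     res = []
--     for a in range(p, endLimit + 1):
--         if _is_prime(a) and pow(2, a - 1, a * a) == 1:
--             res.append(a)
--     return res
-- ===== Notes on version B (the rewrite author's own statement) =====
-- stated objective: faster
-- what changed: Trial division only up to sqrt(a) instead of a/2, and the Wieferich test uses modular exponentiation pow(2, a-1, a*a) instead of computing the full big integer 2**(a-1)-1 and testing its Fraction fractional part.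
import Mathlib
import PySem

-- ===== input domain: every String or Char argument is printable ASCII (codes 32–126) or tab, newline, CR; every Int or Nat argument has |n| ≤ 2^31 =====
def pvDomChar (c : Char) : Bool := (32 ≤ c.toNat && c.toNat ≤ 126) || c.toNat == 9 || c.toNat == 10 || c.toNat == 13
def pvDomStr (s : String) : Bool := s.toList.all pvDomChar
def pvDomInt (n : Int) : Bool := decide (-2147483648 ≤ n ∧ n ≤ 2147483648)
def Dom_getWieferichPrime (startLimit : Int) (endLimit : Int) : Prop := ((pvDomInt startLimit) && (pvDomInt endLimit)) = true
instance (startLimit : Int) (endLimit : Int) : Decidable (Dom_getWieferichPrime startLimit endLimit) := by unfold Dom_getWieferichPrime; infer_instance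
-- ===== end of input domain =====

-- B replaces A's trial division to a/2 and exact big-integer 2**(a-1) Fraction test by trial
-- division to √a and modular exponentiation pow(2, a-1, a*a) — measurably faster, same results.

-- ===== PORT A =====
-- Literal port of A. 'int(a/2)' is PySem.Int.truncdiv a 2 (exact for |a| < 2^53); the inner
-- 'for … break' that sets k to 1 at the first divisor and otherwise leaves it 0 is the List.any
-- of the same range; '2**(a-1)' is 2^(a-1).toNat (exact on Pre_, where every a ≥ 2); Fraction
-- arithmetic is ℚ, and 'int(z)' is ⌊z⌋ (exact here since z ≥ 0 for a ≥ 2).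
def getWieferichPrime (startLimit : Int) (endLimit : Int) : List Int :=
  let p := if startLimit = 1 then 2 else startLimit
  (PySem.List.pyRange p (endLimit + 1) 1).foldl
    (fun l1 a =>
      let k : Int :=
        if (PySem.List.pyRange 2 (PySem.Int.truncdiv a 2 + 1) 1).any
            (fun i => PySem.Int.mod a i == 0) then 1 else 0
      if k ≤ 0 then
        let x : Int := a * a
        let y : Int := 2 ^ (a - 1).toNat - 1
        let z : ℚ := (y : ℚ) / (x : ℚ)
        let z' : ℚ := z - ((⌊z⌋ : ℤ) : ℚ)
        if z' = 0 then l1 ++ [a] else l1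
      else l1)
    []

-- ===== PORT B =====
-- B's '_is_prime': while i*i <= n, trial division; values are nonnegative past the n < 2 guard,
-- so the loop runs over Nat.
def pvPrimeLoop (n : Nat) (i : Nat) : Bool :=
  if i * i ≤ n then (if n % i == 0 then false else pvPrimeLoop n (i + 1)) else true
termination_by n + 1 - i
decreasing_by
  rcases Nat.eq_zero_or_pos i with h0 | h0
  · omega
  · have hi : i ≤ i * i := Nat.le_mul_of_pos_left i h0
    omega

def pvIsPrime (n : Int) : Bool :=
  if n < 2 then false else pvPrimeLoop n.toNat 2

-- Literal port of B; 'pow(2, a-1, a*a)' is PySem.Int.powMod.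
def getWieferichPrime_alt (startLimit : Int) (endLimit : Int) : List Int :=
  let p := if startLimit = 1 then 2 else startLimit
  (PySem.List.pyRange p (endLimit + 1) 1).foldl
    (fun res a =>
      if pvIsPrime a && (PySem.Int.powMod 2 (a - 1).toNat (a * a) == 1) then res ++ [a]
      else res)
    []

-- ===== PRECONDITION & SPEC =====
-- Pre_ excludes exactly the inputs where A raises: whenever startLimit ≤ 0 and the range is
-- non-empty, the first iteration hits a ≤ 0, where 2**(a-1) is a float (or Fraction's
-- denominator is 0) and A raises TypeError/ZeroDivisionError.
def Pre_getWieferichPrime (startLimit : Int) (endLimit : Int) : Prop :=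
  1 ≤ startLimit ∨ endLimit < startLimit
instance (startLimit : Int) (endLimit : Int) : Decidable (Pre_getWieferichPrime startLimit endLimit) := by unfold Pre_getWieferichPrime; infer_instance
def pvWitness_getWieferichPrime : Int × Int := (1, 30)

def Spec_getWieferichPrime (startLimit : Int) (endLimit : Int) (out : List Int) : Prop := out = getWieferichPrime_alt startLimit endLimit
instance (startLimit : Int) (endLimit : Int) (out : List Int) : Decidable (Spec_getWieferichPrime startLimit endLimit out) := by unfold Spec_getWieferichPrime; infer_instance

-- ===== CLAIM (what is proved, stated in full; the proofs are below) =====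
def Claim_equal_getWieferichPrime : Prop := ∀ (startLimit : Int) (endLimit : Int), Dom_getWieferichPrime startLimit endLimit → Pre_getWieferichPrime startLimit endLimit → Spec_getWieferichPrime startLimit endLimit (getWieferichPrime startLimit endLimit)

-- ===== LEMMAS AND PROOFS =====

-- B's trial-division loop returns true iff no i ≥ j with i*i ≤ n divides n.
theorem pvPrimeLoop_eq_true_iff (n j : Nat) :
    pvPrimeLoop n j = true ↔ ∀ i : Nat, j ≤ i → i * i ≤ n → n % i ≠ 0 := by
  fun_induction pvPrimeLoop n j with
  | case1 j hle hmod =>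
    simp only [Bool.false_eq_true, false_iff]
    intro h
    exact h j le_rfl hle (by simpa using hmod)
  | case2 j hle hmod ih =>
    rw [ih]
    constructor
    · intro h i hji hii
      rcases Nat.eq_or_lt_of_le hji with rfl | hlt
      · simpa using hmod
      · exact h i hlt hii
    · intro h i hji hii
      exact h i (by omega) hii
  | case3 j hle =>
    simp only [true_iff]
    intro i hji hii
    exact absurd (le_trans (Nat.mul_le_mul hji hji) hii) hle

-- the two trial-division bounds agree: a divisor in [2, n/2] exists iff one in [2, √n] does
theorem divisor_bound_iff (n : Nat) (hn : 2 ≤ n) :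
    (∃ m : Nat, 2 ≤ m ∧ m ≤ n / 2 ∧ n % m = 0) ↔ (∃ m : Nat, 2 ≤ m ∧ m * m ≤ n ∧ n % m = 0) := by
  constructor
  · rintro ⟨m, hm2, hm, hmod⟩
    have hdvd : m ∣ n := Nat.dvd_of_mod_eq_zero hmod
    obtain ⟨c, hc⟩ := hdvd
    have hm0 : 0 < m := by omega
    have hc2 : 2 ≤ c := by
      by_contra hlt
      interval_cases c <;> omega
    rcases le_total m c with h | h
    · exact ⟨m, hm2, by nlinarith, hmod⟩
    · exact ⟨c, hc2, by nlinarith, by rw [hc]; exact Nat.mul_mod_left m c⟩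
  · rintro ⟨m, hm2, hmm, hmod⟩
    have hdvd : m ∣ n := Nat.dvd_of_mod_eq_zero hmod
    obtain ⟨c, hc⟩ := hdvd
    have hc2 : m ≤ c := by nlinarith
    refine ⟨m, hm2, ?_, hmod⟩
    have : m * 2 ≤ n := by nlinarith
    omega

-- A's inner loop = negation of B's primality test (a ≥ 2)
theorem trial_eq (a : Int) (ha : 2 ≤ a) :
    ((PySem.List.pyRange 2 (PySem.Int.truncdiv a 2 + 1) 1).any
      (fun i => PySem.Int.mod a i == 0)) = !(pvIsPrime a) := by
  obtain ⟨n, rfl⟩ : ∃ n : Nat, a = (n : Int) := ⟨a.toNat, (Int.toNat_of_nonneg (by omega)).symm⟩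
  have hn : 2 ≤ n := by exact_mod_cast ha
  have htd : PySem.Int.truncdiv (n:Int) 2 = ((n / 2 : Nat) : Int) := by
    show Int.tdiv _ _ = _
    rw [Int.tdiv_eq_ediv_of_nonneg (by positivity)]
    push_cast [Int.natCast_ediv]
    ring
  have hA : ((PySem.List.pyRange 2 (PySem.Int.truncdiv (n:Int) 2 + 1) 1).any
      (fun i => PySem.Int.mod (n:Int) i == 0)) = true ↔
      ∃ m : Nat, 2 ≤ m ∧ m ≤ n / 2 ∧ n % m = 0 := by
    rw [List.any_eq_true]
    constructor
    · rintro ⟨i, hmem, hbeq⟩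
      rw [PySem.List.mem_pyRange_one] at hmem
      obtain ⟨h2i, hlt⟩ := hmem
      have hdvd : i ∣ (n : Int) := (PySem.Int.mod_eq_zero_iff_dvd _ _).mp (by simpa using hbeq)
      rw [htd] at hlt
      refine ⟨i.toNat, by omega, by omega, ?_⟩
      have hd : (i.toNat : Int) ∣ (n : Int) := by rwa [Int.toNat_of_nonneg (by omega)]
      rw [Int.natCast_dvd_natCast] at hd
      exact Nat.dvd_iff_mod_eq_zero.mp hd
    · rintro ⟨m, h2m, hm, hmod⟩
      refine ⟨(m : Int), ?_, ?_⟩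
      · rw [PySem.List.mem_pyRange_one, htd]
        constructor <;> [exact_mod_cast h2m; exact_mod_cast (by omega : (m:Int) < (n/2 : Nat) + 1)]
      · simp only [beq_iff_eq]
        rw [PySem.Int.mod_eq_zero_iff_dvd]
        exact_mod_cast Int.natCast_dvd_natCast.mpr (Nat.dvd_of_mod_eq_zero hmod)
  have hB : pvIsPrime (n:Int) = true ↔
      ¬ ∃ m : Nat, 2 ≤ m ∧ m * m ≤ n ∧ n % m = 0 := by
    unfold pvIsPrime
    rw [if_neg (by exact_mod_cast not_lt.mpr ha)]
    rw [Int.toNat_natCast, pvPrimeLoop_eq_true_iff]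
    constructor
    · rintro h ⟨m, h2m, hmm, hmod⟩; exact h m h2m hmm hmod
    · intro h i h2i hii hmod; exact h ⟨i, h2i, hii, hmod⟩
  rcases Bool.eq_false_or_eq_true (pvIsPrime (n:Int)) with hb | hb <;> rw [hb]
  · rw [Bool.not_true, Bool.eq_false_iff]
    intro h
    exact (hB.mp hb) ((divisor_bound_iff n hn).mp (hA.mp h))
  · rw [Bool.not_false, hA, divisor_bound_iff n hn]
    exact not_not.mp (fun hc => absurd (hB.mpr hc) (by simp [hb]))

-- A's Fraction test = B's modular-power test (a ≥ 2)
theorem wief_eq (a : Int) (ha : 2 ≤ a) :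
    (Int.fract (((2:ℚ) ^ (a.toNat - 1) - 1) / ((a:ℚ) * (a:ℚ))) = 0) ↔
      PySem.Int.powMod 2 (a.toNat - 1) (a * a) = 1 := by
  set e := a.toNat - 1 with he
  set x : Int := a * a with hx
  have hx1 : 1 < x := by nlinarith
  set y : Int := 2 ^ e - 1 with hy
  have hc1 : ((2:ℚ) ^ e - 1) = ((y : ℤ) : ℚ) := by rw [hy]; push_cast; ring
  have hc2 : ((a:ℚ) * (a:ℚ)) = ((x : ℤ) : ℚ) := by rw [hx]; push_cast; ring
  rw [hc1, hc2]
  have h1 : (Int.fract ((y : ℚ) / (x : ℚ)) = 0) ↔ x ∣ y := by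
    rw [Int.fract_eq_iff]
    constructor
    · rintro ⟨-, -, z, hz⟩
      rw [sub_zero] at hz
      refine ⟨z, ?_⟩
      field_simp at hz
      exact_mod_cast hz
    · rintro ⟨q, hq⟩
      refine ⟨by norm_num, by norm_num, q, ?_⟩
      rw [sub_zero, hq]
      push_cast
      rw [mul_comm, mul_div_assoc, div_self (by positivity), mul_one]
  have h2 : PySem.Int.powMod 2 e x = 2 ^ e % x := by
    rw [PySem.Int.powMod_eq, PySem.Int.mod_eq_emod_of_pos (by omega)]
  rw [h1, h2]
  constructor
  · rintro ⟨q, hq⟩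
    have h3 : (2:ℤ) ^ e = 1 + x * q := by omega
    rw [h3, Int.add_mul_emod_self_left]
    exact Int.emod_eq_of_lt (by norm_num) hx1
  · intro h
    refine Int.dvd_of_emod_eq_zero ?_
    rw [hy, Int.sub_emod, h]
    simp

-- ===== VERDICT (by name: the statement is the Claim_ definition above) =====
theorem getWieferichPrime_spec : Claim_equal_getWieferichPrime := by
  intro s e _ hpre
  unfold Spec_getWieferichPrime getWieferichPrime getWieferichPrime_alt
  by_cases hs : 1 ≤ s
  · have hp : 2 ≤ (if s = 1 then (2:Int) else s) := by split_ifs <;> omega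
    apply PySem.List.foldl_congr_mem
    intro acc a hmem
    rw [PySem.List.mem_pyRange_one] at hmem
    have ha : 2 ≤ a := le_trans hp hmem.1
    have ht := trial_eq a ha
    simp only []
    rw [ht]
    rcases Bool.eq_false_or_eq_true (pvIsPrime a) with hb | hb
    · rw [hb]
      norm_num
      simp only [wief_eq a ha]
    · rw [hb]
      norm_num
  · have hre : e < s := by rcases hpre with h | h <;> omega
    rw [if_neg (show ¬ s = 1 by omega)]
    simp only [PySem.List.pyRange_one_eq_nil (show e + 1 ≤ s by omega), List.foldl_nil]
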